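-- pv_equiv track=rewrite | github.com/ejplatform/django-boogie | src/boogie/utils/text.py | humanize_name
-- ===== SOURCE A (Python) =====
-- def humanize_name(name):
--     """
--     "Humanize" camel case or Python variable name.
--
--     Usage:
--         >>> humanize_name('SomeName')
--         'some name'
--     """
--     name = name.replace("_", " ")
--     parts = []
--     buffer = []
--     is_last_lower = False
--     for chr in name:
--         if chr.isupper():
--             if is_last_lower:
--                 parts.append("".join(buffer))
--                 buffer = [chr]
--             else:
--                 buffer.append(chr)
--             is_last_lower = False
--         else:
--             is_last_lower = True
--             buffer.append(chr)
--
--     parts.append("".join(buffer))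
--     return " ".join(parts)
-- ===== SOURCE B (Python) =====
-- def humanize_name(name):
--     """
--     "Humanize" camel case or Python variable name.
--
--     Staged approach: replace underscores by spaces, compute the list of
--     word-start indices (an uppercase letter whose predecessor is not
--     uppercase), then slice the string at those indices and join the
--     slices with single spaces.
--     """
--     s = name.replace("_", " ")
--     cuts = [i for i in range(1, len(s)) if s[i].isupper() and not s[i - 1].isupper()]
--     bounds = [0] + cuts + [len(s)]
--     return " ".join(s[a:b] for a, b in zip(bounds, bounds[1:]))
-- ===== Notes on version B (the rewrite author's own statement) =====
-- stated objective: alternative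
-- what changed: Replaces A's streaming char loop with its parts/buffer/is_last_lower state by a staged index-based algorithm: first compute the list of word-start indices (uppercase preceded by non-uppercase), then cut the underscore-replaced string into slices at those indices and join the slices with spaces.
import Mathlib
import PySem

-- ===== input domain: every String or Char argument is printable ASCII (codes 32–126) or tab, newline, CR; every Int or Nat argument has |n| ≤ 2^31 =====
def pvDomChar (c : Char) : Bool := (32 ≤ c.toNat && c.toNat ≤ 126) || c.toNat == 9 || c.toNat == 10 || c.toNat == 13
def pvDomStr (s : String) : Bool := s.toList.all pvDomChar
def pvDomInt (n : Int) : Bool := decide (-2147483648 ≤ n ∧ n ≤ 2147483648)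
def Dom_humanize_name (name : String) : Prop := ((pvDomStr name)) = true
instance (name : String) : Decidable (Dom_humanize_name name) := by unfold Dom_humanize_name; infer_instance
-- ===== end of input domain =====

-- B replaces A's streaming parts/buffer/is_last_lower loop by a staged algorithm:
-- compute word-start indices, then slice the string there and join with spaces; objective: alternative.

-- ===== PORT A =====
-- the for-loop over (parts, buffer, is_last_lower), then parts.append(buffer); " ".join(parts)
def humanizeLoopA (cs : List Char) (parts : List (List Char)) (buffer : List Char)
    (isLastLower : Bool) : List Char :=
  match cs with
  | [] => PySem.Chars.join [' '] (parts ++ [buffer])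
  | c :: rest =>
    if PySem.Chars.isupper c then
      if isLastLower then humanizeLoopA rest (parts ++ [buffer]) [c] false
      else humanizeLoopA rest parts (buffer ++ [c]) false
    else humanizeLoopA rest parts (buffer ++ [c]) true

def humanize_name (name : String) : String :=
  String.ofList (humanizeLoopA (PySem.Str.replace name "_" " ").toList [] [] false)

-- ===== PORT B =====
-- s[i].isupper() for an index i guaranteed in range by the enclosing range(1, len(s))
-- (pyGet? is exact; the .getD false default is never reached on those indices)
def pvUpAt (s : List Char) (i : Int) : Bool :=
  ((PySem.List.pyGet? s i).map PySem.Chars.isupper).getD false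

-- the comprehension's condition: s[i].isupper() and not s[i-1].isupper()
def pvCutAt (s : List Char) (i : Int) : Bool := pvUpAt s i && !pvUpAt s (i - 1)

def humanize_name_alt (name : String) : String :=
  let s := (PySem.Str.replace name "_" " ").toList
  let n : Int := s.length
  let cuts : List Int := (PySem.List.pyRange 1 n 1).filter (pvCutAt s)
  let bounds : List Int := 0 :: cuts ++ [n]
  String.ofList (PySem.Chars.join [' ']
    ((bounds.zip (PySem.List.slice bounds (some 1) none)).map
      (fun p => PySem.List.slice s (some p.1) (some p.2))))

-- ===== PRECONDITION & SPEC =====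
def Spec_humanize_name (name : String) (out : String) : Prop := out = humanize_name_alt name
instance (name : String) (out : String) : Decidable (Spec_humanize_name name out) := by unfold Spec_humanize_name; infer_instance

-- ===== CLAIM (what is proved, stated in full; the proofs are below) =====
def Claim_equal_humanize_name : Prop := ∀ (name : String), Dom_humanize_name name → Spec_humanize_name name (humanize_name name)

-- ===== LEMMAS AND PROOFS =====

-- common reference form: emit a space before an uppercase char whose predecessor flag is "not upper"
def pvEmit : List Char → Bool → List Char
  | [], _ => []
  | c :: r, p => (if PySem.Chars.isupper c && !p then [' ', c] else [c]) ++ pvEmit r (PySem.Chars.isupper c)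

-- appending a char to the last part appends it to the join
lemma join_last_snoc (xs : List (List Char)) (ys : List Char) (c : Char) :
    PySem.Chars.join [' '] (xs ++ [ys ++ [c]])
      = PySem.Chars.join [' '] (xs ++ [ys]) ++ [c] := by
  induction xs with
  | nil => simp [PySem.Chars.join_singleton]
  | cons a xs ih =>
    cases xs with
    | nil => simp [PySem.Chars.join_cons_cons, PySem.Chars.join_singleton]
    | cons b xs' =>
      simp only [List.cons_append, PySem.Chars.join_cons_cons] at *
      simp [ih]

-- starting a fresh one-char part appends " " ++ [c] to the join
lemma join_new_part (xs : List (List Char)) (ys : List Char) (c : Char) :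
    PySem.Chars.join [' '] ((xs ++ [ys]) ++ [[c]])
      = PySem.Chars.join [' '] (xs ++ [ys]) ++ [' ', c] := by
  induction xs with
  | nil => simp [PySem.Chars.join_cons_cons, PySem.Chars.join_singleton]
  | cons a xs ih =>
    cases xs with
    | nil => simp [PySem.Chars.join_cons_cons, PySem.Chars.join_singleton]
    | cons b xs' =>
      simp only [List.cons_append, List.append_assoc, List.cons_append,
        PySem.Chars.join_cons_cons] at *
      simpa using ih

-- A's loop state joins to the emit reference form
lemma loopA_emit (cs : List Char) : ∀ (parts : List (List Char)) (buffer : List Char) (p : Bool),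
    humanizeLoopA cs parts buffer (!p)
      = PySem.Chars.join [' '] (parts ++ [buffer]) ++ pvEmit cs p := by
  induction cs with
  | nil => intro parts buffer p; simp [humanizeLoopA, pvEmit]
  | cons c rest ih =>
    intro parts buffer p
    by_cases hu : PySem.Chars.isupper c = true
    · cases p with
      | true =>
        rw [show humanizeLoopA (c :: rest) parts buffer (!true)
            = humanizeLoopA rest parts (buffer ++ [c]) false from by
          simp [humanizeLoopA, hu]]
        have H := ih parts (buffer ++ [c]) true
        simp only [Bool.not_true] at H
        rw [H, join_last_snoc]
        simp [pvEmit, hu]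
      | false =>
        rw [show humanizeLoopA (c :: rest) parts buffer (!false)
            = humanizeLoopA rest (parts ++ [buffer]) [c] false from by
          simp [humanizeLoopA, hu]]
        have H := ih (parts ++ [buffer]) [c] true
        simp only [Bool.not_true] at H
        have H2 : PySem.Chars.join [' '] ((parts ++ [buffer]) ++ [[c]])
            = PySem.Chars.join [' '] (parts ++ [buffer]) ++ [' ', c] := join_new_part parts buffer c
        rw [H, H2]
        simp [pvEmit, hu]
    · simp only [Bool.not_eq_true] at hu
      rw [show humanizeLoopA (c :: rest) parts buffer (!p)
          = humanizeLoopA rest parts (buffer ++ [c]) true from by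
        simp [humanizeLoopA, hu]]
      have H := ih parts (buffer ++ [c]) false
      simp only [Bool.not_false] at H
      rw [H, join_last_snoc]
      simp [pvEmit, hu]

-- pvEmit only reads its flag through the head char's upper test
lemma pvEmit_flag (xs : List Char) (p : Bool)
    (h : ∀ c, xs.head? = some c → PySem.Chars.isupper c = true → p = true) :
    pvEmit xs p = pvEmit xs true := by
  cases xs with
  | nil => rfl
  | cons c r =>
    by_cases hu : PySem.Chars.isupper c = true
    · have := h c rfl hu
      subst this; rfl
    · simp only [Bool.not_eq_true] at hu
      simp [pvEmit, hu]

-- prepend chars to the first part of a join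
lemma join_head_append (x y : List Char) (rest : List (List Char)) :
    PySem.Chars.join [' '] ((x ++ y) :: rest) = x ++ PySem.Chars.join [' '] (y :: rest) := by
  cases rest with
  | nil => simp [PySem.Chars.join_singleton]
  | cons r t => simp [PySem.Chars.join_cons_cons]

-- an empty first part contributes exactly the separator
lemma join_nil_cons (y : List Char) (t : List (List Char)) :
    PySem.Chars.join [' '] ([] :: y :: t) = ' ' :: PySem.Chars.join [' '] (y :: t) := by
  simp [PySem.Chars.join_cons_cons]

-- slice s a b starts with s[a] when a < b and a in range (Int upper bound)
lemma slice_cons_getElem (s : List Char) (a : Nat) (h : Int) (ha : a < s.length)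
    (hh : (a : Int) < h) :
    PySem.List.slice s (some (a : Int)) (some h)
      = s[a] :: PySem.List.slice s (some ((a : Int) + 1)) (some h) := by
  have h0 : (0:Int) ≤ (a:Int) := by positivity
  have h1 : (0:Int) ≤ h := by omega
  rw [PySem.List.slice_toNat s h0 h1, PySem.List.slice_toNat s (by omega) h1]
  have hdrop : s.drop a = s[a] :: s.drop (a + 1) := List.drop_eq_getElem_cons ha
  have htn : ((a:Int) + 1).toNat = a + 1 := by omega
  rw [Int.toNat_natCast, htn, hdrop,
    show h.toNat - a = (h.toNat - (a + 1)) + 1 from by omega, List.take_succ_cons]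

-- every member of a cut list ++ [n] is strictly above a
lemma mem_cuts_lb (s : List Char) (a b : Int) (x : Int)
    (hx : x ∈ ((PySem.List.pyRange b (s.length : Int) 1).filter (pvCutAt s)) ++ [(s.length : Int)])
    (hab : a < b) (han : a < (s.length : Int)) : a < x := by
  rcases List.mem_append.mp hx with h | h
  · have := PySem.List.mem_pyRange_one.mp (List.mem_of_mem_filter h)
    omega
  · simp at h; omega

-- main B lemma: join of slices at the cut indices from a equals pvEmit on the suffix
lemma joinSlices_emit (s : List Char) : ∀ (k a : Nat), a ≤ s.length → s.length - a = k →
    PySem.Chars.join [' ']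
      ((((a : Int) :: ((PySem.List.pyRange ((a : Int) + 1) (s.length : Int) 1).filter (pvCutAt s)
          ++ [(s.length : Int)])).zip
        ((PySem.List.pyRange ((a : Int) + 1) (s.length : Int) 1).filter (pvCutAt s)
          ++ [(s.length : Int)])).map
        (fun p => PySem.List.slice s (some p.1) (some p.2)))
      = pvEmit (s.drop a) true := by
  intro k
  induction k with
  | zero =>
    intro a ha hk
    have hae : a = s.length := by omega
    subst hae
    rw [PySem.List.pyRange_one_eq_nil (by omega)]
    simp only [List.filter_nil, List.nil_append, List.zip_cons_cons, List.zip_nil_right,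
      List.map_cons, List.map_nil]
    rw [PySem.Chars.join_singleton, PySem.List.slice_toNat s (by positivity) (by positivity)]
    simp [pvEmit, List.drop_eq_nil_of_le]
  | succ k ih =>
    intro a ha hk
    have halt : a < s.length := by omega
    have hdropa : s.drop a = s[a] :: s.drop (a + 1) := List.drop_eq_getElem_cons halt
    by_cases hedge : a + 1 = s.length
    · -- last char: the remaining range is empty, one slice [s[a]]
      rw [PySem.List.pyRange_one_eq_nil (by omega)]
      have hone : PySem.List.slice s (some (a:Int)) (some (s.length:Int))
          = s[a] :: PySem.List.slice s (some ((a:Int)+1)) (some (s.length:Int)) :=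
        slice_cons_getElem s a _ halt (by omega)
      simp only [List.filter_nil, List.nil_append, List.zip_cons_cons, List.zip_nil_right,
        List.map_cons, List.map_nil, hone]
      have hnil : PySem.List.slice s (some ((a:Int)+1)) (some (s.length:Int)) = [] := by
        rw [PySem.List.slice_toNat s (by omega) (by positivity),
          show ((a:Int)+1).toNat = a + 1 from by omega,
          List.drop_eq_nil_of_le (show s.length ≤ a + 1 from by omega)]
        simp
      rw [hnil, PySem.Chars.join_singleton, hdropa, List.drop_eq_nil_of_le (by omega)]
      simp [pvEmit]
    · -- a + 1 < s.length: peel index a+1 off the range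
      have ha1 : a + 1 < s.length := by omega
      have hlt : (a : Int) + 1 < (s.length : Int) := by omega
      rw [PySem.List.pyRange_one_cons hlt]
      have hget_a : PySem.List.pyGet? s ((a:Int)) = some s[a] := by
        simp [(PySem.List.pyGet?_natCast s a).trans (List.getElem?_eq_getElem halt)]
      have hget_a1 : PySem.List.pyGet? s ((a:Int) + 1) = some s[a+1] := by
        have hc1 : ((a:Int) + 1) = ((a + 1 : Nat) : Int) := by push_cast; ring
        rw [hc1]
        simpa using (PySem.List.pyGet?_natCast s (a+1)).trans (List.getElem?_eq_getElem ha1)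
      have hcut : pvCutAt s ((a:Int) + 1)
          = (PySem.Chars.isupper s[a+1] && !PySem.Chars.isupper s[a]) := by
        simp [pvCutAt, pvUpAt, hget_a1, show (a:Int) + 1 - 1 = (a:Int) from by ring, hget_a]
      have ihs := ih (a + 1) (by omega) (by omega)
      rw [show ((a + 1 : Nat) : Int) = (a : Int) + 1 from by push_cast; ring] at ihs
      have hdropa1 : s.drop (a+1) = s[a+1] :: s.drop (a + 2) := List.drop_eq_getElem_cons ha1
      -- the tail bound list is nonempty
      obtain ⟨t0, ts, hT⟩ : ∃ t0 ts,
          ((PySem.List.pyRange ((a : Int) + 1 + 1) (s.length : Int) 1).filter (pvCutAt s)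
            ++ [(s.length : Int)]) = t0 :: ts := by
        cases hF : (PySem.List.pyRange ((a : Int) + 1 + 1) (s.length : Int) 1).filter (pvCutAt s) with
        | nil => exact ⟨_, _, rfl⟩
        | cons f fs => exact ⟨_, _, rfl⟩
      have ht0mem : t0 ∈ ((PySem.List.pyRange ((a : Int) + 1 + 1) (s.length : Int) 1).filter (pvCutAt s)
            ++ [(s.length : Int)]) := by rw [hT]; exact List.mem_cons_self
      rw [hT] at ihs
      simp only [List.zip_cons_cons, List.map_cons] at ihs
      by_cases hc : pvCutAt s ((a:Int) + 1) = true
      · -- a+1 is a word start: slice [a,a+1), then a space, then the suffix from a+1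
        rw [List.filter_cons_of_pos hc]
        simp only [List.cons_append]
        rw [hT]
        have hup1 : PySem.Chars.isupper s[a+1] = true := by
          rw [hcut] at hc; exact (Bool.and_eq_true_iff.mp hc).1
        have hup0 : PySem.Chars.isupper s[a] = false := by
          rw [hcut] at hc
          have h2 := (Bool.and_eq_true_iff.mp hc).2; simp at h2; exact h2
        have hone : PySem.List.slice s (some (a:Int)) (some ((a:Int)+1))
            = s[a] :: PySem.List.slice s (some ((a:Int)+1)) (some ((a:Int)+1)) :=
          slice_cons_getElem s a _ halt (by omega)
        have hnil : PySem.List.slice s (some ((a:Int)+1)) (some ((a:Int)+1)) = [] := by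
          rw [PySem.List.slice_toNat s (by omega) (by omega)]; simp
        simp only [List.zip_cons_cons, List.map_cons, hone, hnil]
        rw [show (s[a] :: ([] : List Char)) = [s[a]] ++ [] from rfl, join_head_append,
          join_nil_cons, ihs, hdropa, hdropa1]
        simp [pvEmit, hup0, hup1]
      · -- a+1 is interior: the first slice extends one char further
        rw [List.filter_cons_of_neg hc, hT]

        have hat0 : (a : Int) < t0 := mem_cuts_lb s (a:Int) ((a:Int)+1+1) t0 ht0mem (by omega) (by omega)
        have hone : PySem.List.slice s (some (a:Int)) (some t0)
            = s[a] :: PySem.List.slice s (some ((a:Int)+1)) (some t0) :=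
          slice_cons_getElem s a t0 halt hat0
        simp only [List.zip_cons_cons, List.map_cons, hone]
        rw [show (s[a] :: PySem.List.slice s (some ((a:Int)+1)) (some t0))
            = [s[a]] ++ PySem.List.slice s (some ((a:Int)+1)) (some t0) from rfl,
          join_head_append, ihs, hdropa]
        have hflag : pvEmit (s.drop (a+1)) (PySem.Chars.isupper s[a])
            = pvEmit (s.drop (a+1)) true := by
          apply pvEmit_flag
          intro d hd hud
          rw [hdropa1] at hd
          simp only [List.head?_cons, Option.some.injEq] at hd
          subst hd
          by_contra hfa
          have hup0 : PySem.Chars.isupper s[a] = false := by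
            cases hq : PySem.Chars.isupper s[a] with
            | true => exact absurd hq hfa
            | false => rfl
          exact hc (by rw [hcut, hud, hup0]; rfl)
        simp [pvEmit, hflag]

-- ===== VERDICT (by name: the statement is the Claim_ definition above) =====
theorem humanize_name_spec : Claim_equal_humanize_name := by
  intro name _
  unfold Spec_humanize_name humanize_name humanize_name_alt
  have hA := loopA_emit (PySem.Str.replace name "_" " ").toList [] [] true
  simp only [Bool.not_true, List.nil_append, PySem.Chars.join_singleton, List.nil_append] at hA
  have hB := joinSlices_emit (PySem.Str.replace name "_" " ").toList
    (PySem.Str.replace name "_" " ").toList.length 0 (by omega) (by omega)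
  simp only [Nat.cast_zero, List.drop_zero, zero_add] at hB
  rw [hA]
  show String.ofList (pvEmit (PySem.Str.replace name "_" " ").toList true)
      = String.ofList (PySem.Chars.join [' ']
        (((((0:Int) :: ((PySem.List.pyRange 1 ((PySem.Str.replace name "_" " ").toList.length : Int) 1).filter
              (pvCutAt (PySem.Str.replace name "_" " ").toList)
            ++ [((PySem.Str.replace name "_" " ").toList.length : Int)])).zip
          (PySem.List.slice ((0:Int) :: ((PySem.List.pyRange 1 ((PySem.Str.replace name "_" " ").toList.length : Int) 1).filter
              (pvCutAt (PySem.Str.replace name "_" " ").toList)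
            ++ [((PySem.Str.replace name "_" " ").toList.length : Int)])) (some 1) none))).map
          (fun p => PySem.List.slice (PySem.Str.replace name "_" " ").toList (some p.1) (some p.2))))
  rw [PySem.List.slice_from_one]
  simp only [List.tail_cons]
  rw [← hB]
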